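-- pv_equiv track=rewrite | github.com/Sonaion/bachelor-arbeit | DataEvaluation/data/CodeSnippets/Source/condition_sum_iterative.py | function
-- ===== SOURCE A (Python) =====
-- def function(n):
--     array_data = []
--     for i in range(2, n + 1):
--         if i % 3 == 0 or i % 4 == 0:
--             array_data.append(i)
--     result = 0
--     for value in array_data:
--         result += value
--     return result
-- ===== SOURCE B (Python) =====
-- def function(n):
--     # closed form: inclusion-exclusion over multiples of 3 and 4 (O(1))
--     if n < 3:
--         return 0
--     def s(k):
--         m = n // k
--         return k * m * (m + 1) // 2
--     return s(3) + s(4) - s(12)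
-- ===== Notes on version B (the rewrite author's own statement) =====
-- stated objective: faster
-- what changed: Replaced the O(n) loop-and-accumulate over range(2,n+1) with an O(1) inclusion-exclusion closed form: sum of multiples of 3 plus multiples of 4 minus multiples of 12, each by the arithmetic-series formula.
import Mathlib
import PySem

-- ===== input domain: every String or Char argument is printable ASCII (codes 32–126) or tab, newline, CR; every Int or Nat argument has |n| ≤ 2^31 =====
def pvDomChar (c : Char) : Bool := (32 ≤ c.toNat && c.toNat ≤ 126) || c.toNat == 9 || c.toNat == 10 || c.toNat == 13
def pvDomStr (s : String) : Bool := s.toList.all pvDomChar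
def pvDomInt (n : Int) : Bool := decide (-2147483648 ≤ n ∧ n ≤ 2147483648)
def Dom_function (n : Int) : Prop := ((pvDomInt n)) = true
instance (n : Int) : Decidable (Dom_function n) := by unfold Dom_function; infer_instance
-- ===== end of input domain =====

-- B replaces A's O(n) filter-and-sum loop by an O(1) inclusion-exclusion closed form (faster).

-- ===== PORT A =====
def function (n : Int) : Int :=
  let array_data := (PySem.List.pyRange 2 (n + 1) 1).foldl
    (fun acc i => if PySem.Int.mod i 3 == 0 || PySem.Int.mod i 4 == 0 then acc ++ [i] else acc) []
  array_data.foldl (fun r v => r + v) 0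

-- ===== PORT B =====
-- s(k) = k * (n//k) * (n//k + 1) // 2  (B's inner helper)
def altTerm (n k : Int) : Int :=
  let m := PySem.Int.floordiv n k
  PySem.Int.floordiv (k * m * (m + 1)) 2

def function_alt (n : Int) : Int :=
  if n < 3 then 0
  else altTerm n 3 + altTerm n 4 - altTerm n 12

-- ===== PRECONDITION & SPEC =====
def Spec_function (n : Int) (out : Int) : Prop := out = function_alt n
instance (n : Int) (out : Int) : Decidable (Spec_function n out) := by unfold Spec_function; infer_instance

-- ===== CLAIM (what is proved, stated in full; the proofs are below) =====
def Claim_equal_function : Prop := ∀ (n : Int), Dom_function n → Spec_function n (function n)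

-- ===== LEMMAS AND PROOFS =====

-- one-step recurrence of the closed-form term s(k) at x (0 < k, 1 ≤ x)
theorem altTerm_step (x k : Int) (hk : 0 < k) (hx : 1 ≤ x) :
    altTerm x k = altTerm (x - 1) k + (if PySem.Int.mod x k == 0 then x else 0) := by
  have hfd : ∀ a : Int, PySem.Int.floordiv a k = a / k := fun a =>
    PySem.Int.floordiv_eq_ediv_of_pos hk
  have hmd : PySem.Int.mod x k = x % k := PySem.Int.mod_eq_emod_of_pos hk
  have hfd2 : ∀ a : Int, PySem.Int.floordiv a 2 = a / 2 := fun a =>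
    PySem.Int.floordiv_eq_ediv_of_pos (by norm_num)
  have hdm : k * (x / k) + x % k = x := Int.mul_ediv_add_emod x k
  have hr0 : 0 ≤ x % k := Int.emod_nonneg x (ne_of_gt hk)
  have hrk : x % k < k := Int.emod_lt_of_pos x hk
  simp only [altTerm, hfd, hfd2, hmd]
  by_cases h0 : x % k = 0
  · -- x = k * q with q ≥ 1
    set q := x / k with hq
    have hxkq : x = k * q := by omega
    have hq1 : 1 ≤ q := by nlinarith
    have hx1 : (x - 1) / k = q - 1 := by
      have e : x - 1 = (k - 1) + (q - 1) * k := by linear_combination hxkq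
      rw [e, Int.add_mul_ediv_right _ _ (ne_of_gt hk),
        Int.ediv_eq_zero_of_lt (by omega) (by omega)]
      ring
    rw [hx1]
    obtain ⟨t, ht⟩ : Even (q * (q + 1)) := Int.even_mul_succ_self q
    obtain ⟨s, hs⟩ : Even ((q - 1) * q) := by
      have := Int.even_mul_succ_self (q - 1); simpa using this
    have e1 : k * q * (q + 1) = (k * t) * 2 := by rw [mul_assoc, ht]; ring
    have e2 : k * (q - 1) * (q - 1 + 1) = (k * s) * 2 := by
      have : (q - 1) * (q - 1 + 1) = s + s := by simpa using hs
      rw [mul_assoc, this]; ring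
    rw [e1, e2, Int.mul_ediv_cancel _ (by norm_num), Int.mul_ediv_cancel _ (by norm_num)]
    have hts : t = s + q := by
      have h2 : t + t = (s + s) + (q + q) := by linear_combination hs - ht
      omega
    simp only [h0]
    norm_num
    subst hts
    linear_combination -hxkq
  · have hx1 : (x - 1) / k = x / k := by
      set q := x / k with hq
      have e : x - 1 = (x % k - 1) + q * k := by linear_combination -hdm
      rw [e, Int.add_mul_ediv_right _ _ (ne_of_gt hk),
        Int.ediv_eq_zero_of_lt (by omega) (by omega)]
      ring
    rw [hx1]
    simp [h0]

-- abbreviation for B's inclusion-exclusion value (proof-side only)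
def G (n : Int) : Int := altTerm n 3 + altTerm n 4 - altTerm n 12

theorem G_step (x : Int) (hx : 1 ≤ x) :
    G x = G (x - 1) + (if PySem.Int.mod x 3 == 0 || PySem.Int.mod x 4 == 0 then x else 0) := by
  have h3 := altTerm_step x 3 (by norm_num) hx
  have h4 := altTerm_step x 4 (by norm_num) hx
  have h12 := altTerm_step x 12 (by norm_num) hx
  have m3 : PySem.Int.mod x 3 = x % 3 := PySem.Int.mod_eq_emod_of_pos (by norm_num)
  have m4 : PySem.Int.mod x 4 = x % 4 := PySem.Int.mod_eq_emod_of_pos (by norm_num)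
  have m12 : PySem.Int.mod x 12 = x % 12 := PySem.Int.mod_eq_emod_of_pos (by norm_num)
  simp only [G, h3, h4, h12, m3, m4, m12, beq_iff_eq, Bool.or_eq_true]
  split_ifs <;> omega

-- A's two loops collapse to a filter-then-sum over the range
theorem function_eq_filterSum (n : Int) :
    function n = ((PySem.List.pyRange 2 (n + 1) 1).filter
      (fun i => PySem.Int.mod i 3 == 0 || PySem.Int.mod i 4 == 0)).foldl (fun r v => r + v) 0 := by
  have h := PySem.List.foldl_append_if
      (fun i : Int => PySem.Int.mod i 3 == 0 || PySem.Int.mod i 4 == 0)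
      (fun i : Int => i) (PySem.List.pyRange 2 (n + 1) 1) []
  simp only [function, h, List.map_id', List.nil_append]

theorem main_nat (m : Nat) : function (m : Int) = G (m : Int) := by
  induction m with
  | zero => decide
  | succ m ih =>
    rcases Nat.eq_zero_or_pos m with h | h
    · subst h; decide
    · have hx : ((m : Int) + 1) = ((m + 1 : Nat) : Int) := by push_cast; ring
      have hG := G_step ((m : Int) + 1) (by omega)
      have hrange : PySem.List.pyRange 2 (((m : Int) + 1) + 1) 1
          = PySem.List.pyRange 2 ((m : Int) + 1) 1 ++ [(m : Int) + 1] :=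
        PySem.List.pyRange_one_succ_right (by omega : (2:Int) ≤ (m : Int) + 1)
      rw [function_eq_filterSum] at ih ⊢
      rw [← hx, hrange, List.filter_append, List.foldl_append, ih]
      simp only [List.filter_cons, List.filter_nil]
      by_cases hp : (PySem.Int.mod ((m : Int) + 1) 3 == 0 || PySem.Int.mod ((m : Int) + 1) 4 == 0) = true
      · simp only [hp, if_true, List.foldl_cons, List.foldl_nil] at hG ⊢
        simp only [add_sub_cancel_right] at hG
        omega
      · simp only [hp] at hG ⊢
        simp only [if_false, Bool.false_eq_true, List.foldl_nil, add_sub_cancel_right] at hG ⊢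
        omega

-- ===== VERDICT (by name: the statement is the Claim_ definition above) =====
theorem function_spec : Claim_equal_function := by
  intro n _
  unfold Spec_function
  by_cases h2 : n < 2
  · have hnil : PySem.List.pyRange 2 (n + 1) 1 = [] :=
      PySem.List.pyRange_one_eq_nil (by omega)
    simp [function, function_alt, hnil, if_pos (by omega : n < 3)]
  · by_cases h3 : n < 3
    · have : n = 2 := by omega
      subst this; decide
    · obtain ⟨m, rfl⟩ : ∃ m : Nat, n = (m : Int) := ⟨n.toNat, by omega⟩
      rw [main_nat m]
      simp only [function_alt, G, if_neg h3]
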